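-- pv_equiv track=rewrite | github.com/rosstimson/vcconnect-flask | app/main/vcconnect.py | remove_null_options
-- ===== SOURCE A (Python) =====
-- def remove_null_options(dic):
--     dic = dic
--     delete = []
--
--     for k, v in dic.items():
--         if v == 0:
--             delete.append(k)
--
--     for i in delete:
--         del dic[i]
--
--     return dic
-- ===== SOURCE B (Python) =====
-- def remove_null_options(dic):
--     # Fixpoint loop: repeatedly scan for the first zero-valued key, delete it,
--     # and rescan from the start; stop when a full scan finds no zero value.
--     while True:
--         for k, v in dic.items():
--             if v == 0:
--                 del dic[k]
--                 break
--         else: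
--             return dic
-- ===== Notes on version B (the rewrite author's own statement) =====
-- stated objective: alternative
-- what changed: Replaces A's collect-all-zero-keys-then-batch-delete two loops with a fixpoint loop that repeatedly scans for a single zero-valued key, deletes it and rescans until a full scan finds none.
import Mathlib
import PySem

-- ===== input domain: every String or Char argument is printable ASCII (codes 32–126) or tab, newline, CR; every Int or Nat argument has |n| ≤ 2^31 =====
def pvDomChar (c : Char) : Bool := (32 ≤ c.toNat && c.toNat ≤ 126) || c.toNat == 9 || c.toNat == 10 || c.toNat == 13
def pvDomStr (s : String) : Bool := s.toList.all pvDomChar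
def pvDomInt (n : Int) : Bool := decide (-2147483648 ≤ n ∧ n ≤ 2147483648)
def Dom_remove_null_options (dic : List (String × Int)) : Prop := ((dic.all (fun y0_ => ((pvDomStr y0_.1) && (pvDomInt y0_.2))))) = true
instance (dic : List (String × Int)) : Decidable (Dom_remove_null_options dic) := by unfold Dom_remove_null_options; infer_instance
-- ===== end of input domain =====

-- B replaces A's two loops (collect every zero-valued key, then batch-delete them) with a
-- fixpoint loop: repeatedly scan for ONE zero-valued key, delete it, rescan until none is
-- found. Both Pythons mutate the argument dict in place identically; equivalence is about
-- the returned (= mutated) dict.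

-- ===== PORT A =====
-- `del d[k]`: remove the first entry with key k (exact for a dict: keys are unique and k present here)
def pvDelete (d : List (String × Int)) (k : String) : List (String × Int) :=
  match d with
  | [] => []
  | (k', v) :: rest => if k' == k then rest else (k', v) :: pvDelete rest k

def remove_null_options (dic : List (String × Int)) : List (String × Int) :=
  let delete := dic.foldl (fun acc kv => if kv.2 == 0 then acc ++ [kv.1] else acc) ([] : List String)
  delete.foldl pvDelete dic

-- ===== PORT B =====
-- the inner `for … if v == 0: … break / else:` scan: first key whose value is 0, if any
def pvFindZero (d : List (String × Int)) : Option String :=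
  match d with
  | [] => none
  | (k, v) :: rest => if v == 0 then some k else pvFindZero rest

theorem pvFindZero_mem (d : List (String × Int)) (k : String)
    (h : pvFindZero d = some k) : k ∈ d.map Prod.fst := by
  induction d with
  | nil => simp [pvFindZero] at h
  | cons kv rest ih =>
    by_cases h0 : kv.2 = 0
    · simp [pvFindZero, h0] at h; simp [h]
    · simp only [pvFindZero, beq_iff_eq, if_neg h0] at h
      exact List.mem_cons_of_mem _ (ih h)

theorem pvDelete_length_lt (d : List (String × Int)) (k : String)
    (h : k ∈ d.map Prod.fst) : (pvDelete d k).length < d.length := by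
  induction d with
  | nil => simp at h
  | cons kv rest ih =>
    by_cases hk : kv.1 = k
    · simp [pvDelete, hk]
    · simp only [List.map_cons, List.mem_cons] at h
      have h' : k ∈ rest.map Prod.fst := h.resolve_left (fun he => hk he.symm)
      simpa [pvDelete, hk] using ih h'

-- the outer `while True` loop: delete the first zero-valued key and rescan, until none found
def remove_null_options_alt (dic : List (String × Int)) : List (String × Int) :=
  match h : pvFindZero dic with
  | none => dic
  | some k => remove_null_options_alt (pvDelete dic k)
termination_by dic.length
decreasing_by exact pvDelete_length_lt _ _ (pvFindZero_mem _ _ h)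

-- ===== PRECONDITION & SPEC =====
-- Pre_ states the representation invariant of a Python dict (distinct keys); it excludes no
-- actual dict input of A, only association lists that do not encode a dict.
def Pre_remove_null_options (dic : List (String × Int)) : Prop :=
  (dic.map Prod.fst).Nodup
instance (dic : List (String × Int)) : Decidable (Pre_remove_null_options dic) := by
  unfold Pre_remove_null_options; infer_instance

def pvWitness_remove_null_options : (List (String × Int)) := [("a", 0), ("b", 2), ("c", 0)]

def Spec_remove_null_options (dic : List (String × Int)) (out : List (String × Int)) : Prop := out = remove_null_options_alt dic
instance (dic : List (String × Int)) (out : List (String × Int)) : Decidable (Spec_remove_null_options dic out) := by unfold Spec_remove_null_options; infer_instance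

-- ===== CLAIM (what is proved, stated in full; the proofs are below) =====
def Claim_equal_remove_null_options : Prop := ∀ (dic : List (String × Int)), Dom_remove_null_options dic → Pre_remove_null_options dic → Spec_remove_null_options dic (remove_null_options dic)

-- ===== LEMMAS AND PROOFS =====

-- A's first loop builds exactly the keys of the zero-valued entries, in order.
theorem pv_delete_list_eq (dic : List (String × Int)) (acc : List String) :
    dic.foldl (fun acc kv => if kv.2 == 0 then acc ++ [kv.1] else acc) acc
      = acc ++ (dic.filter (fun kv => kv.2 == 0)).map Prod.fst := by
  induction dic generalizing acc with
  | nil => simp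
  | cons kv rest ih =>
    rw [List.foldl_cons, List.filter_cons, ih]
    by_cases h : kv.2 = 0 <;> simp [h]

theorem pv_foldl_delete_cons (L : List String) (k : String) (v : Int)
    (rest : List (String × Int)) (h : k ∉ L) :
    L.foldl pvDelete ((k, v) :: rest) = (k, v) :: L.foldl pvDelete rest := by
  induction L generalizing rest with
  | nil => rfl
  | cons i L ih =>
    have hik : ¬ (k == i) = true := by
      simp only [beq_iff_eq]
      intro hk; exact h (hk ▸ List.mem_cons_self)
    simp only [List.foldl_cons, pvDelete, hik]
    exact ih _ (fun hm => h (List.mem_cons_of_mem _ hm))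

-- Deleting the zero-valued keys from a nodup-keyed dict leaves exactly the non-zero entries.
theorem pv_delete_eq_filter (dic : List (String × Int))
    (hnd : (dic.map Prod.fst).Nodup) :
    ((dic.filter (fun kv => kv.2 == 0)).map Prod.fst).foldl pvDelete dic
      = dic.filter (fun kv => kv.2 != 0) := by
  induction dic with
  | nil => rfl
  | cons kv rest ih =>
    obtain ⟨k, v⟩ := kv
    simp only [List.map_cons, List.nodup_cons] at hnd
    obtain ⟨hk, hrest⟩ := hnd
    by_cases h : v = 0
    · subst h
      have h1 : List.map Prod.fst (List.filter (fun kv => kv.2 == 0) ((k, (0:Int)) :: rest))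
          = k :: List.map Prod.fst (List.filter (fun kv => kv.2 == 0) rest) := by simp
      have hd : pvDelete ((k, (0:Int)) :: rest) k = rest := by simp [pvDelete]
      rw [h1, List.foldl_cons, hd, ih hrest]
      simp
    · have hmem : k ∉ (List.filter (fun kv => kv.2 == 0) rest).map Prod.fst := by
        intro hm
        exact hk (by
          rcases List.mem_map.mp hm with ⟨p, hp, hpk⟩
          exact List.mem_map.mpr ⟨p, List.mem_of_mem_filter hp, hpk⟩)
      have h1 : List.filter (fun kv => kv.2 == 0) ((k, v) :: rest)
          = List.filter (fun kv => kv.2 == 0) rest := by simp [h]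
      rw [h1, pv_foldl_delete_cons _ _ _ _ hmem, ih hrest]
      simp [h]

-- pvDelete yields a sublist (so key-nodup is preserved).
theorem pvDelete_sublist (d : List (String × Int)) (k : String) :
    (pvDelete d k).Sublist d := by
  induction d with
  | nil => simp [pvDelete]
  | cons kv rest ih =>
    by_cases hk : kv.1 = k
    · simpa [pvDelete, hk] using List.sublist_cons_self kv rest
    · simpa [pvDelete, hk] using List.Sublist.cons₂ kv ih

-- findZero = none means every value is non-zero, so the non-zero filter is the identity.
theorem pvFindZero_none (d : List (String × Int)) (h : pvFindZero d = none) :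
    d.filter (fun kv => kv.2 != 0) = d := by
  induction d with
  | nil => rfl
  | cons kv rest ih =>
    by_cases h0 : kv.2 = 0
    · simp [pvFindZero, h0] at h
    · simp only [pvFindZero, beq_iff_eq, if_neg h0] at h
      simp [h0, ih h]

-- One deletion step (first zero-valued key, nodup keys) preserves the non-zero filter.
theorem pv_step_filter (d : List (String × Int)) (k : String)
    (hnd : (d.map Prod.fst).Nodup) (h : pvFindZero d = some k) :
    (pvDelete d k).filter (fun kv => kv.2 != 0) = d.filter (fun kv => kv.2 != 0) := by
  induction d with
  | nil => simp [pvFindZero] at h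
  | cons kv rest ih =>
    obtain ⟨k0, v0⟩ := kv
    simp only [List.map_cons, List.nodup_cons] at hnd
    by_cases h0 : v0 = 0
    · simp [pvFindZero, h0] at h
      subst h h0
      simp [pvDelete]
    · simp only [pvFindZero, beq_iff_eq, if_neg h0] at h
      have hk0 : k ≠ k0 := fun he => hnd.1 (he ▸ pvFindZero_mem rest k h)
      have hd : pvDelete ((k0, v0) :: rest) k = (k0, v0) :: pvDelete rest k := by
        have hne : ¬ (k0 == k) = true := by
          simp only [beq_iff_eq]; exact fun he => hk0 he.symm
        simp [pvDelete, hne]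
      rw [hd, List.filter_cons, List.filter_cons, ih hnd.2 h]

-- B's fixpoint loop computes the non-zero filter on any nodup-keyed dict.
theorem pv_alt_eq_filter (dic : List (String × Int))
    (hnd : (dic.map Prod.fst).Nodup) :
    remove_null_options_alt dic = dic.filter (fun kv => kv.2 != 0) := by
  induction hlen : dic.length using Nat.strong_induction_on generalizing dic with
  | _ n ih =>
    unfold remove_null_options_alt
    split
    case _ h => exact (pvFindZero_none dic h).symm
    case _ k h =>
      have hlt := pvDelete_length_lt dic k (pvFindZero_mem dic k h)
      have hnd' : ((pvDelete dic k).map Prod.fst).Nodup :=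
        hnd.sublist ((pvDelete_sublist dic k).map Prod.fst)
      rw [ih _ (hlen ▸ hlt) _ hnd' rfl, pv_step_filter dic k hnd h]

-- ===== VERDICT (by name: the statement is the Claim_ definition above) =====
theorem remove_null_options_spec : Claim_equal_remove_null_options := by
  intro dic _ hpre
  unfold Spec_remove_null_options remove_null_options
  rw [pv_delete_list_eq, List.nil_append, pv_delete_eq_filter dic hpre,
    pv_alt_eq_filter dic hpre]
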